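-- pv_equiv track=rewrite | github.com/yuukawahiroshi/ddb-tools | pack_ddb.py | escape_filename
-- ===== SOURCE A (Python) =====
-- def escape_filename(filename: str):
--     escaped = ""
--     for char in filename:
--         if char >= 'a' and char <= 'z':
--             escaped += char
--         else:
--             escaped += "%" + str(ord(char)) + "%"
--
--     return escaped
-- ===== SOURCE B (Python) =====
-- def escape_filename(filename: str):
--     out = []
--     i, n = 0, len(filename)
--     while i < n:
--         j = i
--         while j < n and 'a' <= filename[j] <= 'z':
--             j += 1
--         out.append(filename[i:j])
--         if j < n:
--             out.append("%" + str(ord(filename[j])) + "%")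
--             j += 1
--         i = j
--     return "".join(out)
-- ===== Notes on version B (the rewrite author's own statement) =====
-- stated objective: alternative
-- what changed: Replaces A's per-character accumulation with a two-pointer run scanner: an inner pointer skips each maximal lowercase run, which is emitted as one slice, the run-terminating character is emitted as its %ord% escape, and the collected pieces are joined once at the end.
import Mathlib
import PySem

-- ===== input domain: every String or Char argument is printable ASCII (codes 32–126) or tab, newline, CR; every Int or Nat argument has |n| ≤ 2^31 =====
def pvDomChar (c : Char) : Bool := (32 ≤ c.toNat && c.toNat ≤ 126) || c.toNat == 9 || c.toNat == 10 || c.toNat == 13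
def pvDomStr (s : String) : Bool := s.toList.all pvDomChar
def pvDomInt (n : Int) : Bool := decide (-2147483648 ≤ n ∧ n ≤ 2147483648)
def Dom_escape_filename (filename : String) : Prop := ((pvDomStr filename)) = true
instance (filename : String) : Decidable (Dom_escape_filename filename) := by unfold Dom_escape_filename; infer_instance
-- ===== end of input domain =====

-- B replaces A's per-character accumulation by a two-pointer run scanner (slice out each
-- maximal lowercase run, escape the terminator, join once); alternative algorithm, same values.

-- ===== PORT A =====
-- A: loop over chars, appending either the char or "%"+str(ord(char))+"%" to the accumulator.
def escape_filename (filename : String) : String :=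
  String.mk (filename.toList.foldl (fun escaped char =>
    if 'a' ≤ char ∧ char ≤ 'z' then escaped ++ [char]
    else escaped ++ ('%' :: PySem.Int.toChars (char.toNat : Int) ++ ['%'])) [])

-- ===== PORT B =====
-- inner while loop: advance j past the maximal run of lowercase chars starting at j
def pvInner (s : List Char) (j : Nat) : Nat :=
  if h : j < s.length then
    if 'a' ≤ s[j] ∧ s[j] ≤ 'z' then pvInner s (j + 1) else j
  else j
termination_by s.length - j

-- port of B's termination fact, needed by pvOuter's decreasing_by
theorem pvInner_ge (s : List Char) (j : Nat) : j ≤ pvInner s j := by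
  unfold pvInner
  split
  · split
    · exact le_trans (Nat.le_succ j) (pvInner_ge s (j + 1))
    · exact le_refl j
  · exact le_refl j
termination_by s.length - j

-- outer while loop: out collects the lowercase-run slice filename[i:j] and, if any,
-- the escape of the run-terminating char; (s.take j).drop i is exact for filename[i:j]
-- here since 0 ≤ i ≤ j (Python slice clamping agrees on these indices).
def pvOuter (s : List Char) (i : Nat) (out : List (List Char)) : List (List Char) :=
  if hi : i < s.length then
    let j := pvInner s i
    let out' := out ++ [(s.take j).drop i]
    if hj : j < s.length then
      pvOuter s (j + 1) (out' ++ ['%' :: PySem.Int.toChars ((s[j]).toNat : Int) ++ ['%']])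
    else out'
  else out
termination_by s.length - i
decreasing_by
  have := pvInner_ge s i
  omega

-- "".join(out)
def escape_filename_alt (filename : String) : String :=
  String.mk (pvOuter filename.toList 0 []).flatten

-- ===== PRECONDITION & SPEC =====
def Spec_escape_filename (filename : String) (out : String) : Prop := out = escape_filename_alt filename
instance (filename : String) (out : String) : Decidable (Spec_escape_filename filename out) := by unfold Spec_escape_filename; infer_instance

-- ===== CLAIM (what is proved, stated in full; the proofs are below) =====
def Claim_equal_escape_filename : Prop := ∀ (filename : String), Dom_escape_filename filename → Spec_escape_filename filename (escape_filename filename)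

-- ===== LEMMAS AND PROOFS =====

-- per-character replacement (proof-only abbreviation of what both programs emit per char)
def pvRepl (c : Char) : List Char :=
  if 'a' ≤ c ∧ c ≤ 'z' then [c] else '%' :: PySem.Int.toChars (c.toNat : Int) ++ ['%']

theorem pvA_flatMap (s : List Char) :
    s.foldl (fun escaped char =>
      if 'a' ≤ char ∧ char ≤ 'z' then escaped ++ [char]
      else escaped ++ ('%' :: PySem.Int.toChars (char.toNat : Int) ++ ['%'])) [] =
    s.flatMap pvRepl := by
  have h : (fun (escaped : List Char) char =>
      if 'a' ≤ char ∧ char ≤ 'z' then escaped ++ [char]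
      else escaped ++ ('%' :: PySem.Int.toChars (char.toNat : Int) ++ ['%'])) =
      (fun acc x => acc ++ pvRepl x) := by
    funext acc x
    simp only [pvRepl]; split <;> rfl
  rw [h, PySem.List.foldl_append_eq_flatMap, List.nil_append]

theorem pvInner_stop (s : List Char) (j : Nat) :
    ∀ (k : Nat) (_ : k = pvInner s j) (hk : k < s.length),
      ¬ ('a' ≤ s[k] ∧ s[k] ≤ 'z') := by
  intro k hkeq hk
  rw [pvInner] at hkeq
  split at hkeq
  · split at hkeq
    · exact pvInner_stop s (j + 1) k hkeq hk
    · subst hkeq; assumption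
  · subst hkeq; omega
termination_by s.length - j

-- the run [j, pvInner s j) maps to itself under pvRepl
theorem pvInner_run (s : List Char) (j : Nat) :
    (s.drop j).flatMap pvRepl =
      ((s.take (pvInner s j)).drop j) ++ (s.drop (pvInner s j)).flatMap pvRepl := by
  unfold pvInner
  split
  · rename_i hj
    split
    · rename_i hlow
      have ih := pvInner_run s (j + 1)
      have hk : j + 1 ≤ pvInner s (j + 1) := pvInner_ge s (j + 1)
      have hdrop : s.drop j = s[j] :: s.drop (j + 1) := by
        exact (List.drop_eq_getElem_cons hj)
      have hdroptake : (s.take (pvInner s (j+1))).drop j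
          = s[j] :: (s.take (pvInner s (j+1))).drop (j + 1) := by
        have hjlt : j < (s.take (pvInner s (j+1))).length := by
          simp [List.length_take]; omega
        rw [List.drop_eq_getElem_cons hjlt]
        congr 1
        simp [List.getElem_take]
      rw [hdrop, hdroptake]
      simp only [List.flatMap_cons]
      rw [ih]
      simp [pvRepl, hlow]
    · simp
  · rename_i hj
    have : s.drop j = [] := List.drop_eq_nil_of_le (by omega)
    simp [this]
termination_by s.length - j

-- main invariant of the outer loop
theorem pvOuter_spec (s : List Char) (i : Nat) (out : List (List Char)) :
    (pvOuter s i out).flatten = out.flatten ++ (s.drop i).flatMap pvRepl := by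
  unfold pvOuter
  split
  · rename_i hi
    have hrun := pvInner_run s i
    dsimp only
    split
    · rename_i hj
      have ih := pvOuter_spec s (pvInner s i + 1)
          (out ++ [(s.take (pvInner s i)).drop i] ++
            ['%' :: PySem.Int.toChars ((s[pvInner s i]).toNat : Int) ++ ['%']])
      rw [ih]
      have hstop := pvInner_stop s i (pvInner s i) rfl hj
      have hdropj : s.drop (pvInner s i) = s[pvInner s i] :: s.drop (pvInner s i + 1) :=
        List.drop_eq_getElem_cons hj
      rw [hrun, hdropj]
      simp only [List.flatMap_cons, List.flatten_append, List.flatten_cons, List.flatten_nil]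
      simp [pvRepl, hstop]
    · rename_i hj
      have hnil : s.drop (pvInner s i) = [] := List.drop_eq_nil_of_le (by omega)
      rw [hrun, hnil]
      simp
  · rename_i hi
    have hnil : s.drop i = [] := List.drop_eq_nil_of_le (by omega)
    simp [hnil]
termination_by s.length - i
decreasing_by
  have := pvInner_ge s i
  omega

-- ===== VERDICT (by name: the statement is the Claim_ definition above) =====
theorem escape_filename_spec : Claim_equal_escape_filename := by
  intro filename _
  unfold Spec_escape_filename escape_filename escape_filename_alt
  rw [pvA_flatMap, pvOuter_spec]
  simp
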